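-- pv_equiv track=rewrite | github.com/ayoubouahidi/Python_Ai | exercicesmat/ex36.py | Remplissage
-- ===== SOURCE A (Python) =====
-- def Remplissage(L,M):
--     for i in range(L):
--         T = []
--         for j in range(L):
--             if j == 0 or i == L-1 or i == j:
--                 T.append(1)
--             else:
--                 T.append(0)
--         M.append(T)
--     return M
-- ===== SOURCE B (Python) =====
-- def Remplissage(L, M):
--     def row(i):
--         if i == L - 1:
--             return [1] * L
--         if i == 0:
--             return [1] + [0] * (L - 1)
--         return [1] + [0] * (i - 1) + [1] + [0] * (L - 1 - i)
--     M.extend(row(i) for i in range(L))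
--     return M
-- ===== Notes on version B (the rewrite author's own statement) =====
-- stated objective: simpler
-- what changed: Drops the inner per-cell j-loop with its three-way test: each row is built in one step by concatenating constant segments ([1]*L for the last row, [1]+[0]*(L-1) for the first, else [1]+[0]*(i-1)+[1]+[0]*(L-1-i)), and the rows are appended via a single extend over range(L).
import Mathlib
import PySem

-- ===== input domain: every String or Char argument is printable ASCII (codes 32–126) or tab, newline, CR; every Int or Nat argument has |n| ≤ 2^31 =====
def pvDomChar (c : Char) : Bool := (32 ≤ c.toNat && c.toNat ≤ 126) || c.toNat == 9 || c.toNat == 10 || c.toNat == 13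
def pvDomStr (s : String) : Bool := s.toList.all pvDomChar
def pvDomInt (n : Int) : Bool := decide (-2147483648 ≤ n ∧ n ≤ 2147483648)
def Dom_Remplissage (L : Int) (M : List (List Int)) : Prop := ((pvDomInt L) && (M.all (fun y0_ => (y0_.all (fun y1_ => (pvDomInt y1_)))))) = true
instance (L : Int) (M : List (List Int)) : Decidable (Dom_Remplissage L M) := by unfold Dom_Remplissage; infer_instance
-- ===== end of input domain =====

-- B drops A's inner per-cell loop: each row is built in one step from constant segments
-- (all-ones last row, [1]+zeros first row, else 1, zeros, 1, zeros) and rows are appended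
-- by one extend over range(L); simpler, same cost. Both mutate M in place in Python.

-- ===== PORT A =====
def Remplissage (L : Int) (M : List (List Int)) : List (List Int) :=
  (PySem.List.pyRange 0 L 1).foldl (fun M i =>
    M ++ [(PySem.List.pyRange 0 L 1).foldl (fun T j =>
      T ++ [if j = 0 ∨ i = L - 1 ∨ i = j then (1 : Int) else 0]) []]) M

-- ===== PORT B =====
def pvRow (L i : Int) : List Int :=
  if i = L - 1 then List.replicate L.toNat (1 : Int)
  else if i = 0 then [1] ++ List.replicate (L - 1).toNat 0
  else [1] ++ List.replicate (i - 1).toNat 0 ++ [1] ++ List.replicate (L - 1 - i).toNat 0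

def Remplissage_alt (L : Int) (M : List (List Int)) : List (List Int) :=
  M ++ (PySem.List.pyRange 0 L 1).map (pvRow L)

-- ===== PRECONDITION & SPEC =====
def Spec_Remplissage (L : Int) (M : List (List Int)) (out : List (List Int)) : Prop := out = Remplissage_alt L M
instance (L : Int) (M : List (List Int)) (out : List (List Int)) : Decidable (Spec_Remplissage L M out) := by unfold Spec_Remplissage; infer_instance

-- ===== CLAIM (what is proved, stated in full; the proofs are below) =====
def Claim_equal_Remplissage : Prop := ∀ (L : Int) (M : List (List Int)), Dom_Remplissage L M → Spec_Remplissage L M (Remplissage L M)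

-- ===== LEMMAS AND PROOFS =====

-- A's per-cell inner loop produces exactly B's segment-built row, for every i of range(L).
theorem pvRow_eq (L i : Int) (h0 : 0 ≤ i) (hL : i < L) :
    (PySem.List.pyRange 0 L 1).foldl (fun T j =>
      T ++ [if j = 0 ∨ i = L - 1 ∨ i = j then (1 : Int) else 0]) []
    = pvRow L i := by
  rw [PySem.List.foldl_append_singleton_eq_map, List.nil_append, PySem.List.pyRange_one]
  unfold pvRow
  by_cases hlast : i = L - 1
  · simp [hlast, Function.comp_def]
  · rw [if_neg hlast, List.map_map]
    by_cases h0' : i = 0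
    · rw [if_pos h0']
      apply List.ext_getElem
      · simp; omega
      · intro k hk1 hk2
        simp only [List.length_map, List.length_range] at hk1
        simp only [List.getElem_map, List.getElem_range, Function.comp_apply]
        rcases Nat.eq_zero_or_pos k with hk0 | hk0
        · subst hk0; simp [h0']
        · have : ¬ ((0 : Int) + k = 0 ∨ i = L - 1 ∨ i = 0 + k) := by
            push Not; refine ⟨by omega, hlast, by omega⟩
          rw [if_neg this]
          rw [List.getElem_append_right (by simp; omega)]
          simp
    · rw [if_neg h0']
      apply List.ext_getElem
      · simp; omega
      · intro k hk1 hk2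
        simp only [List.length_map, List.length_range] at hk1
        simp only [List.getElem_map, List.getElem_range, Function.comp_apply]
        simp only [List.append_assoc]
        by_cases hk0 : k = 0
        · subst hk0; simp
        · rw [List.getElem_append_right (as := [(1 : Int)]) (by simp; omega)]
          by_cases hik : (i : Int) = 0 + k
          · rw [List.getElem_append_right (as := List.replicate (i - 1).toNat (0 : Int)) (by simp; omega)]
            have hz : k - [(1 : Int)].length - (List.replicate (i - 1).toNat (0 : Int)).length = 0 := by
              simp; omega
            simp only [hz]
            simp [hik, hk0]
          · have : ¬ ((0 : Int) + k = 0 ∨ i = L - 1 ∨ i = 0 + k) := by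
              push Not; exact ⟨by omega, hlast, hik⟩
            rw [if_neg this]
            by_cases hki : k - 1 < (i - 1).toNat
            · rw [List.getElem_append_left (by simpa using hki)]
              simp
            · rw [List.getElem_append_right (as := List.replicate (i - 1).toNat (0 : Int)) (by simpa using hki)]
              rw [List.getElem_append_right (as := [(1 : Int)]) (by simp; omega)]
              simp
-- ===== VERDICT (by name: the statement is the Claim_ definition above) =====
theorem Remplissage_spec : Claim_equal_Remplissage := by
  intro L M _
  unfold Spec_Remplissage Remplissage Remplissage_alt
  rw [PySem.List.foldl_append_singleton_eq_map]
  congr 1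
  apply List.map_congr_left
  intro i hi
  rw [PySem.List.mem_pyRange_one] at hi
  exact pvRow_eq L i hi.1 hi.2
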